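-- pv_equiv track=rewrite | github.com/DanielMandira/Atividade_Perceptron | perceptron.py | processar_funcao_para_features
-- ===== SOURCE A (Python) =====
-- def processar_funcao_para_features(funcao, vocabulario):
--     """Converte uma função em vetor binário baseado no vocabulário"""
--     funcao_lower = funcao.lower()
--     features = []
--
--     for palavra in vocabulario:
--         if palavra in funcao_lower:
--             features.append(1)
--         else:
--             features.append(0)
--
--     return features
-- ===== SOURCE B (Python) =====
-- def processar_funcao_para_features(funcao, vocabulario):
--     """Converte uma funcao em vetor binario baseado no vocabulario"""
--     texto = funcao.lower()
--     n = len(texto)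
--     lengths = {len(p) for p in vocabulario}
--     presentes = {texto[i:i+L] for L in lengths for i in range(n - L + 1)}
--     return [1 if p in presentes else 0 for p in vocabulario]
-- ===== Notes on version B (the rewrite author's own statement) =====
-- stated objective: faster
-- what changed: Instead of scanning the text once per vocabulary word with 'in', B lowercases once, builds one set of every substring of the text whose length occurs in the vocabulary, and answers each word by an O(1) set lookup in vocab order.
import Mathlib
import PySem

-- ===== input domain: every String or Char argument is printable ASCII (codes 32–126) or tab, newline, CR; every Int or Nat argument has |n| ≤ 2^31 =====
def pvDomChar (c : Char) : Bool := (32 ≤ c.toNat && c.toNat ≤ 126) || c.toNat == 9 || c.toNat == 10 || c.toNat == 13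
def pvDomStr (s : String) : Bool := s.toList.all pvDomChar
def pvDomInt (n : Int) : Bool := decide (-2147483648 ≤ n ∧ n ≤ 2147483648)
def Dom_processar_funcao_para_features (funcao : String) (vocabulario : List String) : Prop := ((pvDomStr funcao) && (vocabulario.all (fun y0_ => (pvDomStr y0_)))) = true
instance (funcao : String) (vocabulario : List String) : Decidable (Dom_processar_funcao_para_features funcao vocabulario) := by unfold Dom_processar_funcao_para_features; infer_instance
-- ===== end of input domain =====

-- B replaces the per-word substring scan by one precomputed set of all substrings of the
-- vocabulary's lengths, then emits the vector by set lookups in vocab order (alternative algorithm).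

-- ===== PORT A =====
-- A: lowercase the text, then for each vocab word append 1 if it occurs as a substring else 0.
def processar_funcao_para_features (funcao : String) (vocabulario : List String) : List Int :=
  let funcao_lower := PySem.Str.lower funcao
  vocabulario.foldl
    (fun features palavra =>
      features ++ [if PySem.Str.isIn palavra funcao_lower then (1 : Int) else 0]) []

-- ===== PORT B =====
-- B: lowercase once; collect the set of vocab-word lengths; build the set of every substring
-- of the text having one of those lengths; answer each vocab word by a set-membership lookup.
def processar_funcao_para_features_alt (funcao : String) (vocabulario : List String) : List Int :=
  let texto : List Char := PySem.Chars.lower funcao.toList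
  let n : Int := texto.length
  let lengths : PySem.Set Int := PySem.Set.ofList (vocabulario.map (fun p => (p.toList.length : Int)))
  let presentes : PySem.Set (List Char) := PySem.Set.ofList
    (lengths.flatMap (fun L =>
      (PySem.List.pyRange 0 (n - L + 1) 1).map
        (fun i => PySem.List.slice texto (some i) (some (i + L)))))
  vocabulario.map (fun p => if presentes.contains p.toList then (1 : Int) else 0)

-- ===== PRECONDITION & SPEC =====
def Spec_processar_funcao_para_features (funcao : String) (vocabulario : List String) (out : List Int) : Prop := out = processar_funcao_para_features_alt funcao vocabulario
instance (funcao : String) (vocabulario : List String) (out : List Int) : Decidable (Spec_processar_funcao_para_features funcao vocabulario out) := by unfold Spec_processar_funcao_para_features; infer_instance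

-- ===== CLAIM (what is proved, stated in full; the proofs are below) =====
def Claim_equal_processar_funcao_para_features : Prop := ∀ (funcao : String) (vocabulario : List String), Dom_processar_funcao_para_features funcao vocabulario → Spec_processar_funcao_para_features funcao vocabulario (processar_funcao_para_features funcao vocabulario)

-- ===== LEMMAS AND PROOFS =====

-- every generated slice is an infix of the text
lemma pv_slice_infix (t : List Char) (i L : Int) (hi : 0 ≤ i) (hL : 0 ≤ L) :
    PySem.List.slice t (some i) (some (i + L)) <:+: t := by
  rw [PySem.List.slice_toNat t hi (by omega)]
  exact ((t.drop i.toNat).take_prefix _).isInfix.trans (t.drop_suffix i.toNat).isInfix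

-- membership in B's substring set, for a word whose length is one of the collected lengths,
-- is exactly substring occurrence
lemma pv_mem_presentes_iff (t p : List Char) (Ls : List Int)
    (hLs : ∀ L ∈ Ls, 0 ≤ L) (hp : (p.length : Int) ∈ Ls) :
    p ∈ (Ls.flatMap (fun L =>
      (PySem.List.pyRange 0 ((t.length : Int) - L + 1) 1).map
        (fun i => PySem.List.slice t (some i) (some (i + L)))))
      ↔ p <:+: t := by
  constructor
  · intro h
    rcases List.mem_flatMap.mp h with ⟨L, hL, hmem⟩
    rcases List.mem_map.mp hmem with ⟨i, hi, rfl⟩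
    rcases (PySem.List.mem_pyRange_one).mp hi with ⟨h0, _⟩
    exact pv_slice_infix t i L h0 (hLs L hL)
  · intro h
    rcases h with ⟨s, u, hsu⟩
    apply List.mem_flatMap.mpr
    refine ⟨(p.length : Int), hp, ?_⟩
    apply List.mem_map.mpr
    refine ⟨(s.length : Int), ?_, ?_⟩
    · apply (PySem.List.mem_pyRange_one).mpr
      have : s.length + p.length ≤ t.length := by
        have := congrArg List.length hsu
        simp at this; omega
      constructor
      · exact Int.natCast_nonneg _
      · omega
    · rw [PySem.List.slice_natCast_add]
      subst hsu
      simp [List.take_left']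

-- pointwise agreement of the two per-word tests, for words of the vocabulary
lemma pv_point (funcao : String) (vocabulario : List String) (p : String)
    (hp : p ∈ vocabulario) :
    (if PySem.Str.isIn p (PySem.Str.lower funcao) then (1 : Int) else 0)
      = (if (PySem.Set.ofList
            ((PySem.Set.ofList (vocabulario.map (fun q => (q.toList.length : Int)))).flatMap
              (fun L =>
                (PySem.List.pyRange 0 (((PySem.Chars.lower funcao.toList).length : Int) - L + 1) 1).map
                  (fun i => PySem.List.slice (PySem.Chars.lower funcao.toList) (some i) (some (i + L)))))).contains
            p.toList then (1 : Int) else 0) := by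
  have hmem : (p.toList.length : Int)
      ∈ (PySem.Set.ofList (vocabulario.map (fun q => (q.toList.length : Int)))) := by
    apply (PySem.Set.mem_ofList _ _).mpr
    exact List.mem_map.mpr ⟨p, hp, rfl⟩
  have hpos : ∀ L ∈ (PySem.Set.ofList (vocabulario.map (fun q => (q.toList.length : Int)))),
      (0 : Int) ≤ L := by
    intro L hL
    rcases List.mem_map.mp ((PySem.Set.mem_ofList _ _).mp hL) with ⟨q, _, rfl⟩
    exact Int.natCast_nonneg _
  have key : PySem.Str.isIn p (PySem.Str.lower funcao)
      = (PySem.Set.ofList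
          ((PySem.Set.ofList (vocabulario.map (fun q => (q.toList.length : Int)))).flatMap
            (fun L =>
              (PySem.List.pyRange 0 (((PySem.Chars.lower funcao.toList).length : Int) - L + 1) 1).map
                (fun i => PySem.List.slice (PySem.Chars.lower funcao.toList) (some i) (some (i + L)))))).contains
          p.toList := by
    by_cases h : p.toList <:+: PySem.Chars.lower funcao.toList
    · rw [(PySem.Str.isIn_iff_infix p (PySem.Str.lower funcao)).mpr (by simpa using h)]
      rw [(PySem.Set.contains_iff _ _).mpr]
      exact (PySem.Set.mem_ofList _ _).mpr
        ((pv_mem_presentes_iff _ _ _ hpos hmem).mpr h)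
    · have h1 : PySem.Str.isIn p (PySem.Str.lower funcao) = false := by
        rw [← Bool.not_eq_true]
        intro hc
        exact h (by simpa using (PySem.Str.isIn_iff_infix p (PySem.Str.lower funcao)).mp hc)
      have h2 : ¬ p.toList ∈ (PySem.Set.ofList
          ((PySem.Set.ofList (vocabulario.map (fun q => (q.toList.length : Int)))).flatMap
            (fun L =>
              (PySem.List.pyRange 0 (((PySem.Chars.lower funcao.toList).length : Int) - L + 1) 1).map
                (fun i => PySem.List.slice (PySem.Chars.lower funcao.toList) (some i) (some (i + L)))))) := by
        rw [PySem.Set.mem_ofList]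
        exact fun hc => h ((pv_mem_presentes_iff _ _ _ hpos hmem).mp hc)
      rw [h1]
      symm
      rw [← Bool.not_eq_true, PySem.Set.contains_iff]
      exact h2
  rw [key]

-- ===== VERDICT (by name: the statement is the Claim_ definition above) =====
theorem processar_funcao_para_features_spec : Claim_equal_processar_funcao_para_features := by
  intro funcao vocabulario _
  unfold Spec_processar_funcao_para_features
  unfold processar_funcao_para_features processar_funcao_para_features_alt
  simp only []
  rw [PySem.List.foldl_append_singleton_eq_map]
  exact List.map_congr_left (fun p hp => pv_point funcao vocabulario p hp)
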